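-- pv_equiv track=rewrite | github.com/ansovald/berlin_minnan_dict | dictionary-backend/database_util.py | map_stripped_to_normalized
-- ===== SOURCE A (Python) =====
-- def map_stripped_to_normalized(stripped, normalized):
--     # Create a mapping of the position of each character to its original character
--     mapping = {}
--     norm_counter = 0
--     for i, c in enumerate(stripped):
--         while norm_counter < len(normalized) and normalized[norm_counter] != c:
--             norm_counter += 1
--         if norm_counter < len(normalized):
--             mapping[i] = norm_counter
--             norm_counter += 1
--     return mapping
-- ===== SOURCE B (Python) =====
-- def map_stripped_to_normalized(stripped, normalized):
--     mapping = {}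
--     strip_idx = 0
--     for j, c in enumerate(normalized):
--         if strip_idx < len(stripped) and stripped[strip_idx] == c:
--             mapping[strip_idx] = j
--             strip_idx += 1
--     return mapping
-- ===== Notes on version B (the rewrite author's own statement) =====
-- stated objective: alternative
-- what changed: B drives a single pass over `normalized` with one strip pointer advanced on match, instead of A's outer loop over `stripped` with a nested while-scan over `normalized`; both realise the same greedy earliest-subsequence mapping.
import Mathlib
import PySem

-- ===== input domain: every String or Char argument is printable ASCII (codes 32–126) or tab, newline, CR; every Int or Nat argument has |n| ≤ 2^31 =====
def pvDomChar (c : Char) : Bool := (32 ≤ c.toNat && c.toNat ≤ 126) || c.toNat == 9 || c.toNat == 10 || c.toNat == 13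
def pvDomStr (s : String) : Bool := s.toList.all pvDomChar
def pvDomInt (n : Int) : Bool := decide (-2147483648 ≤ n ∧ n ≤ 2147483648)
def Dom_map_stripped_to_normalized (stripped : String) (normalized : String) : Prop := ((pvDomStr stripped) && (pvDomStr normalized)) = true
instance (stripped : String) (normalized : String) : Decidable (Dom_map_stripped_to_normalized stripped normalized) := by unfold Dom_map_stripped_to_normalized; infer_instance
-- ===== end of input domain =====

-- B replaces A's outer-loop-over-stripped with nested while-scan by a single pass over
-- normalized advancing one strip pointer on match (alternative decomposition, same cost).

-- ===== PORT A =====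
-- the inner `while norm_counter < len(normalized) and normalized[norm_counter] != c`
def aWhile (n : List Char) (nc : Nat) (c : Char) : Nat :=
  if h : nc < n.length then
    if n[nc] = c then nc else aWhile n (nc + 1) c
  else nc
termination_by n.length - nc

-- the `for i, c in enumerate(stripped)` loop; mapping keys i are strictly increasing,
-- so the dict in insertion order is the append-accumulated list
def aGo (n : List Char) (cs : List Char) (i : Nat) (nc : Nat) (acc : List (Int × Int)) : List (Int × Int) :=
  match cs with
  | [] => acc
  | c :: rest =>
    let nc' := aWhile n nc c
    if nc' < n.length then aGo n rest (i + 1) (nc' + 1) (acc ++ [((i : Int), (nc' : Int))])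
    else aGo n rest (i + 1) nc' acc

def map_stripped_to_normalized (stripped : String) (normalized : String) : List (Int × Int) :=
  aGo normalized.toList stripped.toList 0 0 []

-- ===== PORT B =====
-- the `for j, c in enumerate(normalized)` loop with strip pointer si
def bGo (s : List Char) (ns : List Char) (j : Nat) (si : Nat) (acc : List (Int × Int)) : List (Int × Int) :=
  match ns with
  | [] => acc
  | c :: rest =>
    if s[si]? = some c then bGo s rest (j + 1) (si + 1) (acc ++ [((si : Int), (j : Int))])
    else bGo s rest (j + 1) si acc

def map_stripped_to_normalized_alt (stripped : String) (normalized : String) : List (Int × Int) :=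
  bGo stripped.toList normalized.toList 0 0 []

-- ===== PRECONDITION & SPEC =====
def Spec_map_stripped_to_normalized (stripped : String) (normalized : String) (out : List (Int × Int)) : Prop := out = map_stripped_to_normalized_alt stripped normalized
instance (stripped : String) (normalized : String) (out : List (Int × Int)) : Decidable (Spec_map_stripped_to_normalized stripped normalized out) := by unfold Spec_map_stripped_to_normalized; infer_instance

-- ===== CLAIM (what is proved, stated in full; the proofs are below) =====
def Claim_equal_map_stripped_to_normalized : Prop := ∀ (stripped : String) (normalized : String), Dom_map_stripped_to_normalized stripped normalized → Spec_map_stripped_to_normalized stripped normalized (map_stripped_to_normalized stripped normalized)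

-- ===== LEMMAS AND PROOFS =====

-- common greedy two-pointer specification on suffixes, with absolute counters
def spec (s n : List Char) (i j : Nat) : List (Int × Int) :=
  match n, s with
  | [], _ => []
  | _ :: _, [] => []
  | d :: n', c :: s' =>
    if c = d then ((i : Int), (j : Int)) :: spec s' n' (i + 1) (j + 1)
    else spec (c :: s') n' i (j + 1)

theorem spec_nil (s : List Char) (i j : Nat) : spec s [] i j = [] := by
  cases s <;> rfl

theorem spec_s_nil (n : List Char) (i j : Nat) : spec [] n i j = [] := by
  cases n <;> rfl

theorem spec_cons (n : List Char) (c : Char) (s' : List Char) (i : Nat) :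
    ∀ nc, spec (c :: s') (n.drop nc) i nc =
      (if aWhile n nc c < n.length then
        ((i : Int), (aWhile n nc c : Int)) :: spec s' (n.drop (aWhile n nc c + 1)) (i + 1) (aWhile n nc c + 1)
      else []) := by
  intro nc
  induction hfuel : n.length - nc using Nat.strong_induction_on generalizing nc with
  | _ f ih =>
    by_cases h : nc < n.length
    · have hdrop : n.drop nc = n[nc] :: n.drop (nc + 1) := (List.getElem_cons_drop h).symm
      rw [hdrop]
      by_cases hc : n[nc] = c
      · rw [aWhile, dif_pos h, if_pos hc]
        simp [spec, hc, h]
      · rw [aWhile, dif_pos h, if_neg hc]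
        have : spec (c :: s') (n[nc] :: n.drop (nc + 1)) i nc =
            spec (c :: s') (n.drop (nc + 1)) i (nc + 1) := by
          simp only [spec]
          rw [if_neg (fun he => hc he.symm)]
        rw [this]
        exact ih (n.length - (nc + 1)) (by omega) (nc + 1) rfl
    · have hw : aWhile n nc c = nc := by rw [aWhile, dif_neg h]
      rw [List.drop_eq_nil_of_le (by omega), hw, if_neg h, spec_nil]

theorem aGo_eq_spec (n : List Char) (s : List Char) :
    ∀ i nc acc, aGo n s i nc acc = acc ++ spec s (n.drop nc) i nc := by
  induction s with
  | nil => intro i nc acc; cases hd : n.drop nc <;> simp [aGo, spec]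
  | cons c s' ih =>
    intro i nc acc
    rw [aGo, spec_cons]
    by_cases h : aWhile n nc c < n.length
    · rw [if_pos h, if_pos h, ih]
      simp
    · rw [if_neg h, if_neg h, ih]
      have hnc : n.length ≤ aWhile n nc c := by omega
      rw [List.drop_eq_nil_of_le hnc, spec_nil]

theorem bGo_eq_spec (s : List Char) (ns : List Char) :
    ∀ j si acc, bGo s ns j si acc = acc ++ spec (s.drop si) ns si j := by
  induction ns with
  | nil => intro j si acc; rw [spec_nil]; simp [bGo]
  | cons d ns' ih =>
    intro j si acc
    rw [bGo]
    by_cases h : si < s.length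
    · have hdrop : s.drop si = s[si] :: s.drop (si + 1) := (List.getElem_cons_drop h).symm
      have hget : s[si]? = some s[si] := List.getElem?_eq_getElem h
      by_cases hc : s[si] = d
      · rw [if_pos (by rw [hget, hc]), ih, hdrop]
        simp [spec, hc]
      · rw [if_neg (by rw [hget]; exact fun he => hc (Option.some.injEq _ _ ▸ he)), ih, hdrop]
        simp only [spec, if_neg hc]
    · have hnone : s[si]? = none := List.getElem?_eq_none (by omega)
      rw [if_neg (by simp [hnone]), ih, List.drop_eq_nil_of_le (Nat.le_of_not_lt h),
        spec_s_nil, spec_s_nil]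

-- ===== VERDICT (by name: the statement is the Claim_ definition above) =====
theorem map_stripped_to_normalized_spec : Claim_equal_map_stripped_to_normalized := by
  intro stripped normalized _
  show map_stripped_to_normalized stripped normalized = map_stripped_to_normalized_alt stripped normalized
  rw [map_stripped_to_normalized, map_stripped_to_normalized_alt, aGo_eq_spec, bGo_eq_spec]
  simp
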